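-- pv_equiv track=rewrite | github.com/ModernMAK/Object-Struct-Library | tests/practical/test_dds.py | _iterflags
-- ===== SOURCE A (Python) =====
-- from typing import List
--
-- def _iterflags(f: List):
--     if len(f) == 1:
--         yield f[0]
--     else:
--         subset = f[1:]
--         flag = f[0]
--
--         yield flag
--
--         for subflag in _iterflags(subset):
--             yield flag | subflag
--
--         yield from _iterflags(subset)
-- ===== SOURCE B (Python) =====
-- from typing import List
--
-- def _iterflags(f: List):
--     # Iterative bottom-up build: fold over f from the back, maintaining the
--     # subset-OR list of the current suffix; reproduces A's emission order.
--     acc = []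
--     for x in reversed(f):
--         acc = [x] + [x | v for v in acc] + acc
--     yield from acc
-- ===== Notes on version B (the rewrite author's own statement) =====
-- stated objective: alternative
-- what changed: Replaces the recursive generator with an iterative bottom-up fold over reversed(f) that maintains the subset-OR list of the growing suffix.
import Mathlib
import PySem

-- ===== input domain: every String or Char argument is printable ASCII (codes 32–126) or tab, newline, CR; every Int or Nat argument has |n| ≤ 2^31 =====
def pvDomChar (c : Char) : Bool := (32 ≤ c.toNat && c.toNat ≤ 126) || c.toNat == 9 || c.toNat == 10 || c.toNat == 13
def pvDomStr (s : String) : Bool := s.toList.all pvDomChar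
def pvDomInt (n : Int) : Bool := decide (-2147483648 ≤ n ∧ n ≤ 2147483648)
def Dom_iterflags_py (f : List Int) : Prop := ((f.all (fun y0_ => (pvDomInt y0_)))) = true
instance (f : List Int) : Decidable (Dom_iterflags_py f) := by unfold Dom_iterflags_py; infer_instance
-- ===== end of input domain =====

-- B replaces A's recursive generator by an iterative bottom-up fold over the reversed list
-- maintaining the subset-OR list of the growing suffix (objective: alternative decomposition).


-- ===== PORT A =====
-- Literal port of the recursive generator: len == 1 yields the single element,
-- otherwise yields flag, then flag | subflag over the recursion, then the recursion itself.
-- ([] is unreachable under Pre_: Python A raises IndexError there.)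
def iterflags_py (f : List Int) : List Int :=
  match f with
  | [x] => [x]
  | x :: rest => x :: ((iterflags_py rest).map (fun s => Int.lor x s) ++ iterflags_py rest)
  | [] => []

-- ===== PORT B =====
-- Literal port of B: fold over reversed(f), acc := [x] ++ [x | v for v in acc] ++ acc.
def iterflags_py_alt (f : List Int) : List Int :=
  f.reverse.foldl (fun acc x => x :: ((acc.map (fun v => Int.lor x v)) ++ acc)) []

-- ===== PRECONDITION & SPEC =====
-- Pre_ excludes the empty list, on which Python A raises IndexError (f[0]).
def Pre_iterflags_py (f : List Int) : Prop := f ≠ []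
instance (f : List Int) : Decidable (Pre_iterflags_py f) := by unfold Pre_iterflags_py; infer_instance
def pvWitness_iterflags_py : List Int := [1, 2, 4]

def Spec_iterflags_py (f : List Int) (out : List Int) : Prop := out = iterflags_py_alt f
instance (f : List Int) (out : List Int) : Decidable (Spec_iterflags_py f out) := by unfold Spec_iterflags_py; infer_instance

-- ===== CLAIM (what is proved, stated in full; the proofs are below) =====
def Claim_equal_iterflags_py : Prop := ∀ (f : List Int), Dom_iterflags_py f → Pre_iterflags_py f → Spec_iterflags_py f (iterflags_py f)

-- ===== LEMMAS AND PROOFS =====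
-- B's fold over the reverse is the corresponding foldr, and that foldr agrees with A's recursion.
theorem iterflags_alt_foldr (f : List Int) :
    iterflags_py_alt f = f.foldr (fun x acc => x :: ((acc.map (fun v => Int.lor x v)) ++ acc)) [] := by
  simp [iterflags_py_alt, List.foldl_reverse]

theorem iterflags_eq (f : List Int) : iterflags_py f = iterflags_py_alt f := by
  rw [iterflags_alt_foldr]
  induction f with
  | nil => simp [iterflags_py]
  | cons x rest ih =>
    cases rest with
    | nil => simp [iterflags_py]
    | cons y t =>
      rw [List.foldr_cons, ← ih]
      simp [iterflags_py]

-- ===== VERDICT (by name: the statement is the Claim_ definition above) =====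
theorem iterflags_py_spec : Claim_equal_iterflags_py := by
  intro f _ _
  unfold Spec_iterflags_py
  exact iterflags_eq f
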